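-- pv_equiv track=rewrite | github.com/protonnegativo/QuarkScan | tools/subfinder.py | _prioritarios
-- ===== SOURCE A (Python) =====
-- _KEYWORDS_INTERESSE = {
--     "api", "admin", "dev", "staging", "jenkins", "portal", "vpn", "git",
--     "ci", "monitor", "test", "uat", "app", "backend", "internal", "mgmt",
--     "manage", "console", "dashboard", "login", "auth", "mail", "smtp",
--     "ftp", "bastion", "proxy", "artifactory", "sonar", "jira", "confluence",
-- }
--
-- def _prioritarios(saida: str) -> str:
--     linhas = [l.strip() for l in saida.splitlines() if l.strip()]
--     encontrados = [
--         sub for sub in linhas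
--         if any(kw in sub.split(".")[0].lower() for kw in _KEYWORDS_INTERESSE)
--     ]
--     if not encontrados:
--         return ""
--     return "\n\n## SUBDOMÍNIOS_PRIORITÁRIOS\n" + "\n".join(encontrados[:30])
-- ===== SOURCE B (Python) =====
-- _KEYWORDS_INTERESSE = set(
--     "api admin dev staging jenkins portal vpn git ci monitor test uat app "
--     "backend internal mgmt manage console dashboard login auth mail smtp "
--     "ftp bastion proxy artifactory sonar jira confluence".split()
-- )
--
-- # The distinct keyword lengths, computed once.
-- _KW_LENGTHS = sorted({len(k) for k in _KEYWORDS_INTERESSE})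
--
--
-- def _contains_kw(label: str) -> bool:
--     # Inverted matching: instead of scanning each keyword over the label,
--     # enumerate the label's substrings of the keyword lengths and look each
--     # one up in the keyword set (hash lookup).
--     return any(label[i:i + L] in _KEYWORDS_INTERESSE
--                for L in _KW_LENGTHS
--                for i in range(len(label)))
--
--
-- def _prioritarios(saida: str) -> str:
--     hits = []
--     for l in saida.splitlines():
--         sub = l.strip()
--         if sub and _contains_kw(sub.split(".")[0].lower()):
--             hits.append(sub)
--     if not hits:
--         return ""
--     return "\n\n## SUBDOMÍNIOS_PRIORITÁRIOS\n" + "\n".join(hits[:30])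
-- ===== Notes on version B (the rewrite author's own statement) =====
-- stated objective: alternative
-- what changed: B inverts the matching: instead of testing each of the 30 keywords for substring containment in the first label, it enumerates the label's substrings of the (precomputed) keyword lengths and looks each one up in the keyword set, so the per-keyword containment scan disappears; the line pass is an explicit accumulator loop instead of comprehensions.
import Mathlib
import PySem

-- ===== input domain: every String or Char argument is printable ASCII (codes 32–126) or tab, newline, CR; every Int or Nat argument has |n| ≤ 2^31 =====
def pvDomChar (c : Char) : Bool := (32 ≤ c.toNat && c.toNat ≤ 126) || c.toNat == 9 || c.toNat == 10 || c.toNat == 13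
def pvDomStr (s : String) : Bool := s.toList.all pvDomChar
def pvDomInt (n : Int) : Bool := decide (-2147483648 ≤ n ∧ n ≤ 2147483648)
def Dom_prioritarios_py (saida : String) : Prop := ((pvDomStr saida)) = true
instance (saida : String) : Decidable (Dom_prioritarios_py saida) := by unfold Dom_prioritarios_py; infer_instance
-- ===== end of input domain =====

-- B inverts the matching (enumerate the label's substrings of the keyword lengths and look them
-- up in the keyword set, instead of a per-keyword containment scan) — alternative, same result.

-- the module constant _KEYWORDS_INTERESSE (a Python set; only consumed order-independently)
def pvKeywordsInteresse : PySem.Set String := PySem.Set.ofList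
  ["api", "admin", "dev", "staging", "jenkins", "portal", "vpn", "git",
   "ci", "monitor", "test", "uat", "app", "backend", "internal", "mgmt",
   "manage", "console", "dashboard", "login", "auth", "mail", "smtp",
   "ftp", "bastion", "proxy", "artifactory", "sonar", "jira", "confluence"]

-- sub.split(".")[0].lower() — split with a nonempty separator never returns [] or None,
-- so the getD/headD defaults are unreachable (identical subexpression in A and in Source B)
def pvLabel (sub : String) : String :=
  PySem.Str.lower (((PySem.Str.split? sub ".").getD []).headD "")

-- ===== PORT A =====
def prioritarios_py (saida : String) : String :=
  let linhas := ((PySem.Str.splitlines saida).filter (fun l => PySem.Str.strip l ≠ "")).map PySem.Str.strip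
  let encontrados := linhas.filter
    (fun sub => pvKeywordsInteresse.any (fun kw => PySem.Str.isIn kw (pvLabel sub)))
  if encontrados = [] then ""
  else "\n\n## SUBDOMÍNIOS_PRIORITÁRIOS\n" ++ PySem.Str.join "\n" (PySem.List.slice encontrados none (some 30))

-- ===== PORT B =====
-- Source B's _KEYWORDS_INTERESSE = set("api admin … confluence".split()) — same set, built as B builds it
def pvKeywordsB : PySem.Set String := PySem.Set.ofList (PySem.Str.split₀
  ("api admin dev staging jenkins portal vpn git ci monitor test uat app " ++
   "backend internal mgmt manage console dashboard login auth mail smtp " ++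
   "ftp bastion proxy artifactory sonar jira confluence"))

-- _KW_LENGTHS = sorted({len(k) for k in _KEYWORDS_INTERESSE})
def pvKwLengths : List Nat :=
  PySem.List.sorted (PySem.Set.ofList (pvKeywordsB.map (fun k => k.toList.length))) (fun x => x) false

-- _contains_kw: label[i:i+L] with 0 ≤ i < len(label), L ≥ 0 is exactly (drop i).take L (no clamping needed)
def pvContainsKw (label : String) : Bool :=
  pvKwLengths.any (fun L =>
    (List.range label.toList.length).any (fun i =>
      pvKeywordsB.contains (String.ofList ((label.toList.drop i).take L))))

-- the explicit accumulator loop of Source B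
def pvLoopB : List String → List String → List String
  | [], hits => hits
  | l :: rest, hits =>
    let sub := PySem.Str.strip l
    if sub ≠ "" ∧ pvContainsKw (pvLabel sub) = true then pvLoopB rest (hits ++ [sub])
    else pvLoopB rest hits

def prioritarios_py_alt (saida : String) : String :=
  let hits := pvLoopB (PySem.Str.splitlines saida) []
  if hits = [] then ""
  else "\n\n## SUBDOMÍNIOS_PRIORITÁRIOS\n" ++ PySem.Str.join "\n" (PySem.List.slice hits none (some 30))

-- ===== PRECONDITION & SPEC =====
def Spec_prioritarios_py (saida : String) (out : String) : Prop := out = prioritarios_py_alt saida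
instance (saida : String) (out : String) : Decidable (Spec_prioritarios_py saida out) := by unfold Spec_prioritarios_py; infer_instance

-- ===== CLAIM =====
def Claim_equal_prioritarios_py : Prop := ∀ (saida : String), Dom_prioritarios_py saida → Spec_prioritarios_py saida (prioritarios_py saida)

-- ===== LEMMAS AND PROOFS =====

-- B's word-split set is the same set (indeed the same list) as A's literal set
set_option maxRecDepth 8192 in
lemma pv_kw_sets : pvKeywordsB = pvKeywordsInteresse := by decide

-- every keyword is nonempty and its length is a member of the (concrete) length list
set_option maxRecDepth 8192 in
lemma pv_kw_facts : ∀ kw ∈ pvKeywordsInteresse, kw.toList ≠ [] ∧ kw.toList.length ∈ pvKwLengths := by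
  decide

-- B's inverted scan decides exactly A's any-keyword-contained test
lemma pvContainsKw_eq (label : String) :
    pvContainsKw label = pvKeywordsInteresse.any (fun kw => PySem.Str.isIn kw label) := by
  rw [Bool.eq_iff_iff]
  simp only [pvContainsKw, List.any_eq_true, List.mem_range]
  constructor
  · rintro ⟨L, _, i, hi, hc⟩
    have hmem : String.ofList ((label.toList.drop i).take L) ∈ pvKeywordsInteresse := by
      rw [← pv_kw_sets]; simpa using hc
    refine ⟨_, hmem, ?_⟩
    rw [PySem.Str.isIn_iff_infix]
    simp only [String.toList_ofList]
    exact ((label.toList.drop i).take_prefix L).isInfix.trans (label.toList.drop_suffix i).isInfix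
  · rintro ⟨kw, hkw, hin⟩
    obtain ⟨hne, hlen⟩ := pv_kw_facts kw hkw
    obtain ⟨s, t, hst⟩ := (PySem.Str.isIn_iff_infix kw label).mp hin
    refine ⟨kw.toList.length, hlen, s.length, ?_, ?_⟩
    · have : label.toList.length = s.length + kw.toList.length + t.length := by
        rw [← hst]; simp; omega
      have := List.length_pos_of_ne_nil hne
      omega
    · have hdt : (label.toList.drop s.length) = kw.toList ++ t := by
        rw [← hst, List.append_assoc, List.drop_left]
      rw [hdt, List.take_left]
      simp only [String.ofList_toList]
      rw [pv_kw_sets]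
      simpa using hkw

-- A's candidate list
def pvCand (ls : List String) : List String :=
  List.filter (fun sub => pvKeywordsInteresse.any (fun kw => PySem.Str.isIn kw (pvLabel sub)))
    (List.map PySem.Str.strip (List.filter (fun l => PySem.Str.strip l ≠ "") ls))

lemma pvLoopB_eq (ls : List String) : ∀ hits : List String,
    pvLoopB ls hits = hits ++ pvCand ls := by
  induction ls with
  | nil => intro hits; simp [pvLoopB, pvCand]
  | cons l rest ih =>
    intro hits
    by_cases hs : PySem.Str.strip l = ""
    · simp only [pvLoopB]
      rw [if_neg (by simp [hs]), ih]
      simp [pvCand, hs]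
    · simp only [pvLoopB]
      by_cases hm : pvContainsKw (pvLabel (PySem.Str.strip l)) = true
      · rw [if_pos ⟨hs, hm⟩, ih]
        have : pvCand (l :: rest) = PySem.Str.strip l :: pvCand rest := by
          simp only [pvCand, List.filter_cons]
          rw [if_pos (by simpa using hs), List.map_cons, List.filter_cons,
            if_pos (by rw [← pvContainsKw_eq]; exact hm)]
        rw [this]; simp
      · rw [if_neg (by rintro ⟨_, h⟩; exact hm h), ih]
        have : pvCand (l :: rest) = pvCand rest := by
          simp only [pvCand, List.filter_cons]
          rw [if_pos (by simpa using hs), List.map_cons, List.filter_cons,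
            if_neg (by rw [← pvContainsKw_eq]; simpa using hm)]
        rw [this]

-- ===== VERDICT =====
theorem prioritarios_py_spec : Claim_equal_prioritarios_py := by
  intro saida _
  unfold Spec_prioritarios_py prioritarios_py prioritarios_py_alt
  rw [pvLoopB_eq (PySem.Str.splitlines saida) [], List.nil_append]
  rfl
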